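-- pv_equiv track=rewrite | github.com/ChamberZ40/marneo-agent | marneo/employee/interview.py | parse_question
-- ===== SOURCE A (Python) =====
-- def parse_question(raw: str) -> tuple[str, list[tuple[str, str]]]:
--     """Parse 'question\\nA. opt\\nB. opt' → (question_text, [(letter, text)])."""
--     lines = [l.rstrip() for l in raw.strip().splitlines()]
--     options: list[tuple[str, str]] = []
--     question_lines: list[str] = []
--     in_options = False
--     for line in lines:
--         stripped = line.strip()
--         if (len(stripped) >= 3 and stripped[0].isupper()
--                 and stripped[1] in ".、)" and stripped[2] == " "):
--             in_options = True
--             options.append((stripped[0], stripped[3:].strip()))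
--         elif not in_options and stripped:
--             question_lines.append(stripped)
--     return " ".join(question_lines).strip(), options
-- ===== SOURCE B (Python) =====
-- def parse_question(raw: str) -> tuple[str, list[tuple[str, str]]]:
--     """Parse 'question\nA. opt\nB. opt' -> (question_text, [(letter, text)])."""
--
--     def is_option(s: str) -> bool:
--         return len(s) >= 3 and s[0].isupper() and s[1] in ".、)" and s[2] == " "
--
--     stripped = [l.strip() for l in raw.strip().splitlines()]
--     options = [(s[0], s[3:].strip()) for s in stripped if is_option(s)]
--     first = next((i for i, s in enumerate(stripped) if is_option(s)), len(stripped))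
--     question = " ".join(s for s in stripped[:first] if s)
--     return question.strip(), options
-- ===== Notes on version B (the rewrite author's own statement) =====
-- stated objective: simpler
-- what changed: Replaced A's single-pass state machine with an in_options flag by a split-point decomposition: an is_option predicate, one comprehension collecting all option lines, findIdx of the first option line, and a filter of the nonempty lines before it for the question.
import Mathlib
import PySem

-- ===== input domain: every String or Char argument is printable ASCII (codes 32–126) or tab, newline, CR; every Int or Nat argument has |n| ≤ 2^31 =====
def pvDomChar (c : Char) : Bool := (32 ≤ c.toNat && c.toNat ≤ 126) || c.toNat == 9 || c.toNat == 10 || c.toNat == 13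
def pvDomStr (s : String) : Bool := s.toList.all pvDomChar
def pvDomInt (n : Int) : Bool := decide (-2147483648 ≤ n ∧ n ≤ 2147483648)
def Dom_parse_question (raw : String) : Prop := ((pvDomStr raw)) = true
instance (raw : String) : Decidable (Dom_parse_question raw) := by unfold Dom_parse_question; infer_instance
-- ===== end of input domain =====

-- B replaces A's one-pass in_options state machine by a split-point decomposition (option
-- predicate + filter/findIdx); objective: simpler, same O(n) cost.

-- ===== PORT A =====
-- literal transliteration of A: fold over rstripped lines with state (options, question_lines, in_options)
def parse_question (raw : String) : String × (List (String × String)) :=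
  let lines := (PySem.Str.splitlines (PySem.Str.strip raw)).map (fun l => PySem.Str.rstrip l)
  let st := lines.foldl
    (fun (st : List (String × String) × List String × Bool) line =>
      let stripped := PySem.Str.strip line
      -- 'len(stripped) >= 3 and stripped[0].isupper() and stripped[1] in ".、)" and stripped[2] == " "'
      let isOpt : Bool := match stripped.toList with
        | c0 :: c1 :: c2 :: _ =>
            PySem.Chars.isupper c0 && (c1 == '.' || c1 == '、' || c1 == ')') && (c2 == ' ')
        | _ => false
      if isOpt then
        -- options.append((stripped[0], stripped[3:].strip())); in_options = True
        (st.1 ++ [match stripped.toList with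
                  | c0 :: _ => (String.ofList [c0], PySem.Str.strip (PySem.Str.slice stripped (some 3) none))
                  | [] => ("", "")],
         st.2.1, true)
      else if !st.2.2 && !(stripped == "") then
        (st.1, st.2.1 ++ [stripped], st.2.2)
      else st)
    (([], [], false) : List (String × String) × List String × Bool)
  (PySem.Str.strip (PySem.Str.join " " st.2.1), st.1)

-- ===== PORT B =====
-- is_option(s): len(s) >= 3 and s[0].isupper() and s[1] in ".、)" and s[2] == " "
-- (the s[i] lookups are guarded by len(s) >= 3, so the Option lookups never miss where it matters)
def pq_is_option (s : String) : Bool :=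
  decide (3 ≤ PySem.Str.len s)
    && ((PySem.Str.pyGet? s 0).elim false PySem.Chars.isupper)
    && ((PySem.Str.pyGet? s 1).elim false (fun c => c == '.' || c == '、' || c == ')'))
    && ((PySem.Str.pyGet? s 2).elim false (fun c => c == ' '))

-- (s[0], s[3:].strip()); s[0] as the 1-char string — only ever applied to option lines (nonempty)
def pq_opt (s : String) : String × String :=
  (String.ofList (s.toList.take 1), PySem.Str.strip (PySem.Str.slice s (some 3) none))

def parse_question_alt (raw : String) : String × (List (String × String)) :=
  let stripped := (PySem.Str.splitlines (PySem.Str.strip raw)).map (fun l => PySem.Str.strip l)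
  let options := (stripped.filter pq_is_option).map pq_opt
  -- next((i for i, s in enumerate(stripped) if is_option(s)), len(stripped)) = List.findIdx
  let first := stripped.findIdx pq_is_option
  let question := PySem.Str.join " " ((stripped.take first).filter (fun s => !(s == "")))
  (PySem.Str.strip question, options)

-- ===== PRECONDITION & SPEC =====
def Spec_parse_question (raw : String) (out : String × (List (String × String))) : Prop := out = parse_question_alt raw
instance (raw : String) (out : String × (List (String × String))) : Decidable (Spec_parse_question raw out) := by unfold Spec_parse_question; infer_instance

-- ===== CLAIM (what is proved, stated in full; the proofs are below) =====
def Claim_equal_parse_question : Prop := ∀ (raw : String), Dom_parse_question raw → Spec_parse_question raw (parse_question raw)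

-- ===== LEMMAS AND PROOFS =====

-- A's loop body, on the already-stripped line (definitionally equal to the lambda in parse_question)
def pqStep (st : List (String × String) × List String × Bool) (s : String) :
    List (String × String) × List String × Bool :=
  if pq_is_option s then (st.1 ++ [pq_opt s], st.2.1, true)
  else if !st.2.2 && !(s == "") then (st.1, st.2.1 ++ [s], st.2.2)
  else st

theorem pq_rstrip_append_cons (t r : List Char) (h : Char) (hh : PySem.Chars.isspace h = false) :
    PySem.Chars.rstrip (t ++ h :: r) = t ++ h :: PySem.Chars.rstrip r := by
  simp only [PySem.Chars.rstrip, List.reverse_append, List.reverse_cons]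
  rw [List.dropWhile_append (xs := r.reverse ++ [h])]
  have hne : ¬ (List.dropWhile PySem.Chars.isspace (r.reverse ++ [h])).isEmpty = true := by
    rw [List.dropWhile_append]
    split <;> simp [hh]
  rw [if_neg hne, List.dropWhile_append]
  split
  · next e =>
    rw [List.isEmpty_iff] at e
    simp [hh, e]
  · simp

theorem pq_lstrip_rstrip_comm (l : List Char) :
    PySem.Chars.lstrip (PySem.Chars.rstrip l) = PySem.Chars.rstrip (PySem.Chars.lstrip l) := by
  cases hr : List.dropWhile PySem.Chars.isspace l with
  | nil =>
    have hall : ∀ x ∈ l, PySem.Chars.isspace x = true := List.dropWhile_eq_nil_iff.mp hr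
    have hrev : List.dropWhile PySem.Chars.isspace l.reverse = [] :=
      List.dropWhile_eq_nil_iff.mpr (fun x hx => hall x (List.mem_reverse.mp hx))
    simp [PySem.Chars.lstrip, PySem.Chars.rstrip, hr, hrev]
  | cons h r' =>
    have hh : PySem.Chars.isspace h = false := by
      have := List.head_dropWhile_not PySem.Chars.isspace (l := l) (by simp [hr])
      simpa [hr] using this
    have hl : l = List.takeWhile PySem.Chars.isspace l ++ h :: r' := by
      conv_lhs => rw [← List.takeWhile_append_dropWhile (p := PySem.Chars.isspace) (l := l)]
      rw [hr]
    have hsp : ∀ x ∈ List.takeWhile PySem.Chars.isspace l, PySem.Chars.isspace x = true :=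
      fun x hx => List.mem_takeWhile_imp hx
    have hres : PySem.Chars.rstrip l
        = List.takeWhile PySem.Chars.isspace l ++ h :: PySem.Chars.rstrip r' := by
      conv_lhs => rw [hl]
      exact pq_rstrip_append_cons _ _ _ hh
    calc PySem.Chars.lstrip (PySem.Chars.rstrip l)
        = PySem.Chars.lstrip (List.takeWhile PySem.Chars.isspace l ++ h :: PySem.Chars.rstrip r') := by
          rw [hres]
      _ = h :: PySem.Chars.rstrip r' := by
          simp [PySem.Chars.lstrip, List.dropWhile_append, List.dropWhile_eq_nil_iff.mpr hsp, hh]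
      _ = PySem.Chars.rstrip (PySem.Chars.lstrip l) := by
          have := pq_rstrip_append_cons [] r' h hh
          simp only [List.nil_append] at this
          simp [PySem.Chars.lstrip, hr, this]

theorem pq_strip_rstrip (l : List Char) :
    PySem.Chars.strip (PySem.Chars.rstrip l) = PySem.Chars.strip l := by
  simp only [PySem.Chars.strip]
  rw [pq_lstrip_rstrip_comm]
  simp [PySem.Chars.rstrip, List.dropWhile_idempotent]

theorem pq_str_strip_rstrip (s : String) :
    PySem.Str.strip (PySem.Str.rstrip s) = PySem.Str.strip s := by
  simp [PySem.Str.strip, PySem.Str.rstrip, String.toList_ofList, pq_strip_rstrip]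

theorem pq_foldl_true (ss : List String) (opts : List (String × String)) (qs : List String) :
    ss.foldl pqStep (opts, qs, true)
      = (opts ++ (ss.filter pq_is_option).map pq_opt, qs, true) := by
  induction ss generalizing opts with
  | nil => simp
  | cons s ss ih =>
    cases hp : pq_is_option s <;>
      simp [pqStep, hp, ih, List.append_assoc]

theorem pq_foldl_false (ss : List String) (opts : List (String × String)) (qs : List String) :
    ss.foldl pqStep (opts, qs, false)
      = (opts ++ (ss.filter pq_is_option).map pq_opt,
         qs ++ (ss.take (ss.findIdx pq_is_option)).filter (fun s => !(s == "")),
         ss.any pq_is_option) := by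
  induction ss generalizing opts qs with
  | nil => simp
  | cons s ss ih =>
    cases hp : pq_is_option s with
    | true =>
      simp [pqStep, hp, pq_foldl_true, List.findIdx_cons, List.append_assoc]
    | false =>
      cases he : (s == "") with
      | true =>
        simp [pqStep, hp, he, ih, List.findIdx_cons]
      | false =>
        simp [pqStep, hp, he, ih, List.findIdx_cons, List.append_assoc]

theorem pq_is_option_toList (s : String) :
    pq_is_option s = (match s.toList with
      | c0 :: c1 :: c2 :: _ =>
          PySem.Chars.isupper c0 && (c1 == '.' || c1 == '、' || c1 == ')') && (c2 == ' ')
      | _ => false) := by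
  unfold pq_is_option
  rcases hl : s.toList with _ | ⟨c0, _ | ⟨c1, _ | ⟨c2, t⟩⟩⟩ <;>
    simp [PySem.Str.len_eq, PySem.Str.pyGet?, PySem.List.pyGet?, PySem.List.pyIdx?, hl,
      Bool.and_assoc]
  rw [if_pos (by omega), if_pos (by omega), if_pos (by omega)]
  have h3 : (3:Int) ≤ ↑t.length + 1 + 1 + 1 := by omega
  simp [h3]

-- ===== VERDICT (by name: the statement is the Claim_ definition above) =====
theorem parse_question_spec : Claim_equal_parse_question := by
  intro raw _
  show parse_question raw = parse_question_alt raw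
  have hstep : (fun (st : List (String × String) × List String × Bool) (line : String) =>
      let stripped := PySem.Str.strip line
      let isOpt : Bool := match stripped.toList with
        | c0 :: c1 :: c2 :: _ =>
            PySem.Chars.isupper c0 && (c1 == '.' || c1 == '、' || c1 == ')') && (c2 == ' ')
        | _ => false
      if isOpt then
        (st.1 ++ [match stripped.toList with
                  | c0 :: _ => (String.ofList [c0], PySem.Str.strip (PySem.Str.slice stripped (some 3) none))
                  | [] => ("", "")],
         st.2.1, true)
      else if !st.2.2 && !(stripped == "") then
        (st.1, st.2.1 ++ [stripped], st.2.2)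
      else st)
      = fun st line => pqStep st (PySem.Str.strip line) := by
    funext st line
    simp only [pqStep, pq_is_option_toList, pq_opt]
    rcases hl : (PySem.Str.strip line).toList with _ | ⟨c0, _ | ⟨c1, _ | ⟨c2, t⟩⟩⟩ <;>
      simp [hl]
  simp only [parse_question]
  rw [hstep, List.foldl_map]
  simp only [pq_str_strip_rstrip]
  rw [← List.foldl_map (f := fun l => PySem.Str.strip l) (g := pqStep), pq_foldl_false]
  simp [parse_question_alt]
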